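-- pv_equiv track=rewrite | github.com/vickdavinci/alpha-nextgen-v2-private | scripts/ultra_minify.py | remove_standalone_docstrings
-- ===== SOURCE A (Python) =====
-- def remove_standalone_docstrings(source: str) -> str:
--     """Remove standalone triple-quoted docstring/comment blocks."""
--     lines = source.splitlines(keepends=True)
--     out = []
--     i = 0
--     while i < len(lines):
--         line = lines[i]
--         stripped = line.lstrip()
--         if stripped.startswith('"""') or stripped.startswith("'''"):
--             quote = stripped[:3]
--             if stripped.count(quote) >= 2 and stripped.strip() != quote:
--                 i += 1
--                 continue
--             i += 1
--             while i < len(lines):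
--                 if quote in lines[i]:
--                     i += 1
--                     break
--                 i += 1
--             continue
--         out.append(line)
--         i += 1
--     return "".join(out)
-- ===== SOURCE B (Python) =====
-- def _split_at_opener(lines):
--     """Split the line list at the first line opening a triple-quoted block."""
--     for j, line in enumerate(lines):
--         s = line.lstrip()
--         if s.startswith('"""') or s.startswith("'''"):
--             return lines[:j], lines[j:]
--     return lines, []
--
--
-- def remove_standalone_docstrings(source: str) -> str:
--     lines = source.splitlines(keepends=True)
--     out = []
--     while lines:
--         pre, rest = _split_at_opener(lines)
--         out.extend(pre)
--         if not rest:
--             break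
--         opener, tail = rest[0], rest[1:]
--         s = opener.lstrip()
--         q = s[:3]
--         if s.count(q) >= 2 and s.strip() != q:
--             lines = tail                      # one-line docstring: drop just this line
--         else:
--             k = 0                             # index of the terminating line
--             while k < len(tail) and q not in tail[k]:
--                 k += 1
--             lines = tail[k + 1:]              # slice past the terminator (or past the end)
--     return "".join(out)
-- ===== Notes on version B (the rewrite author's own statement) =====
-- stated objective: alternative
-- what changed: Replaces A's per-line index scan with nested while by a chunk-at-a-time decomposition: split the line list at the next docstring opener, bulk-copy the clean slice, then locate the block terminator by index search and slice past it.
import Mathlib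
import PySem

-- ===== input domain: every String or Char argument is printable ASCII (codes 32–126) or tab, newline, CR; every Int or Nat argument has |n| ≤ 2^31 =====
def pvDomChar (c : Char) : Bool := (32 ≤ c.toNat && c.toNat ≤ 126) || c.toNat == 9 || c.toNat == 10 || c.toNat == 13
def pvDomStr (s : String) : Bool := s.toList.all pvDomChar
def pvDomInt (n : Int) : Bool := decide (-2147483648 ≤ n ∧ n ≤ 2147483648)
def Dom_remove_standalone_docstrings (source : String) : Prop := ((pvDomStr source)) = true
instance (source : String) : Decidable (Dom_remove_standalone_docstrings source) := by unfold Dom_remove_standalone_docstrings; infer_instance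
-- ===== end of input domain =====

-- B replaces A's per-line index scan with nested while by a chunk-at-a-time decomposition:
-- split the line list at the next docstring opener, bulk-copy the clean slice, then find the
-- block terminator by index search and slice past it (objective: alternative, same return value).

-- splitlines(keepends=True), ported by hand over List Char: exact on the Dom character set, where
-- the only line-break characters are '\n', '\r' and the pair '\r\n'.
def pvSplitKeep : List Char → List Char → List (List Char)
  | [], acc => if acc = [] then [] else [acc.reverse]
  | '\n' :: rest, acc => (acc.reverse ++ ['\n']) :: pvSplitKeep rest []
  | '\r' :: '\n' :: rest, acc => (acc.reverse ++ ['\r', '\n']) :: pvSplitKeep rest []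
  | '\r' :: rest, acc => (acc.reverse ++ ['\r']) :: pvSplitKeep rest []
  | c :: rest, acc => pvSplitKeep rest (c :: acc)

-- ===== PORT A =====
-- inner 'while i < len(lines): if quote in lines[i]: i += 1; break; i += 1' — the lines after the closing line
def pvSkipA (quote : List Char) : List (List Char) → List (List Char)
  | [] => []
  | l :: rest => if PySem.Chars.isIn quote l then rest else pvSkipA quote rest

-- outer 'while i < len(lines)' loop, as recursion over the remaining lines
def pvGoA : List (List Char) → List (List Char)
  | [] => []
  | line :: rest =>
    let stripped := PySem.Chars.lstrip line
    if PySem.Chars.startswith stripped ['"', '"', '"'] || PySem.Chars.startswith stripped ['\'', '\'', '\''] then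
      let quote := PySem.Chars.slice stripped none (some 3)
      if decide (PySem.Chars.count stripped quote ≥ 2) && !(PySem.Chars.strip stripped == quote) then
        pvGoA rest
      else
        pvGoA (pvSkipA quote rest)
    else line :: pvGoA rest
termination_by l => l.length
decreasing_by
  · simp
  · have : ∀ (L : List (List Char)), (pvSkipA quote L).length ≤ L.length := by
      intro L
      induction L with
      | nil => simp [pvSkipA]
      | cons h t ih =>
        rw [pvSkipA]
        split
        · simp
        · simp only [List.length_cons]; omega
    simpa using Nat.lt_succ_of_le (this rest)
  · simp

def remove_standalone_docstrings (source : String) : String :=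
  String.ofList (PySem.Chars.join [] (pvGoA (pvSplitKeep source.toList [])))

-- ===== PORT B =====
-- '_split_at_opener' predicate: a line whose lstrip starts with a triple quote
def pvIsOpener (line : List Char) : Bool :=
  let s := PySem.Chars.lstrip line
  PySem.Chars.startswith s ['"', '"', '"'] || PySem.Chars.startswith s ['\'', '\'', '\'']

-- 'while lines:' chunk loop: pre/rest = _split_at_opener(lines) (= takeWhile/dropWhile at the first
-- opener), bulk-copy pre, then drop one line or slice past the terminator found by index search
def pvGoB (lines : List (List Char)) : List (List Char) :=
  let pre := lines.takeWhile (fun l => !pvIsOpener l)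
  match h : lines.dropWhile (fun l => !pvIsOpener l) with
  | [] => pre
  | opener :: tail =>
    let s := PySem.Chars.lstrip opener
    let q := PySem.Chars.slice s none (some 3)
    if decide (PySem.Chars.count s q ≥ 2) && !(PySem.Chars.strip s == q) then
      pre ++ pvGoB tail
    else
      pre ++ pvGoB (tail.drop (tail.findIdx (fun l => PySem.Chars.isIn q l) + 1))
termination_by lines.length
decreasing_by
  · have h1 : (lines.dropWhile (fun l => !pvIsOpener l)).length ≤ lines.length :=
      (List.dropWhile_sublist _).length_le
    rw [h] at h1; simp at h1; omega
  · have h1 : (lines.dropWhile (fun l => !pvIsOpener l)).length ≤ lines.length :=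
      (List.dropWhile_sublist _).length_le
    rw [h] at h1
    simp only [List.length_cons, List.length_drop] at *
    omega

def remove_standalone_docstrings_alt (source : String) : String :=
  String.ofList (PySem.Chars.join [] (pvGoB (pvSplitKeep source.toList [])))

-- ===== PRECONDITION & SPEC =====
def Spec_remove_standalone_docstrings (source : String) (out : String) : Prop := out = remove_standalone_docstrings_alt source
instance (source : String) (out : String) : Decidable (Spec_remove_standalone_docstrings source out) := by unfold Spec_remove_standalone_docstrings; infer_instance

-- ===== CLAIM (what is proved, stated in full; the proofs are below) =====
def Claim_equal_remove_standalone_docstrings : Prop := ∀ (source : String), Dom_remove_standalone_docstrings source → Spec_remove_standalone_docstrings source (remove_standalone_docstrings source)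

-- ===== LEMMAS AND PROOFS =====

-- A's inner terminator scan drops exactly through the first line containing the quote
theorem pvSkipA_eq_drop (q : List Char) (l : List (List Char)) :
    pvSkipA q l = l.drop (l.findIdx (fun x => PySem.Chars.isIn q x) + 1) := by
  induction l with
  | nil => simp [pvSkipA]
  | cons h t ih =>
    rw [pvSkipA]
    by_cases hq : PySem.Chars.isIn q h = true
    · simp [hq, List.findIdx_cons]
    · simp [hq, List.findIdx_cons, ih]

-- A copies each non-opener line through unchanged, so A on any list is the takeWhile prefix
-- followed by A on the dropWhile suffix
theorem pvGoA_split (l : List (List Char)) :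
    pvGoA l = l.takeWhile (fun x => !pvIsOpener x) ++ pvGoA (l.dropWhile (fun x => !pvIsOpener x)) := by
  induction l with
  | nil => simp [pvGoA]
  | cons h t ih =>
    by_cases hop : pvIsOpener h = true
    · simp [hop]
    · rw [List.takeWhile_cons, List.dropWhile_cons]
      simp only [hop, Bool.not_false, if_pos]
      rw [pvGoA]
      simp only [pvIsOpener] at hop
      simp [hop, ih]

-- head of a non-empty dropWhile fails the predicate
theorem pv_dropWhile_head_false {a : Type} (p : a → Bool) (l : List a) (x : a) (t : List a)
    (h : l.dropWhile p = x :: t) : p x = false := by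
  induction l with
  | nil => simp [List.dropWhile] at h
  | cons y ys ih =>
    rw [List.dropWhile_cons] at h
    by_cases hy : p y = true
    · exact ih (by simpa [hy] using h)
    · simp [hy] at h
      rw [← h.1]
      simpa using hy

-- main induction: the chunk decomposition computes A's scan
theorem pvGoB_eq_pvGoA (n : ℕ) (l : List (List Char)) (hn : l.length ≤ n) :
    pvGoB l = pvGoA l := by
  induction n generalizing l with
  | zero =>
    have : l = [] := by cases l <;> simp_all
    subst this; simp [pvGoB, pvGoA]
  | succ n ih =>
    rw [pvGoB]
    have hlen : (l.dropWhile (fun x => !pvIsOpener x)).length ≤ l.length :=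
      (List.dropWhile_sublist _).length_le
    rcases hdw : l.dropWhile (fun x => !pvIsOpener x) with _ | ⟨opener, tail⟩
    · simp only
      rw [pvGoA_split l, hdw]
      simp [pvGoA]
    · have hop : pvIsOpener opener = true := by
        have := pv_dropWhile_head_false _ _ _ _ hdw
        simpa using this
      have htail : tail.length ≤ n := by rw [hdw] at hlen; simp at hlen; omega
      simp only
      rw [pvGoA_split l, hdw, pvGoA]
      simp only [pvIsOpener] at hop
      rw [if_pos hop]
      split
      · next hc =>
        rw [ih tail htail]
        simp
        intro hstrip
        have hc2 := hc
        simp only [Bool.and_eq_true, decide_eq_true_eq, ge_iff_le, Bool.not_eq_true',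
          beq_eq_false_iff_ne] at hc2
        exact absurd (hstrip hc2.1) hc2.2
      · next hc =>
        have hc' : (decide (PySem.Chars.count (PySem.Chars.lstrip opener)
            (PySem.Chars.slice (PySem.Chars.lstrip opener) none (some 3)) ≥ 2) &&
            !(PySem.Chars.strip (PySem.Chars.lstrip opener) ==
              PySem.Chars.slice (PySem.Chars.lstrip opener) none (some 3))) = false := by
          simpa using hc
        have hd : ((tail.drop (tail.findIdx (fun x => PySem.Chars.isIn
            (PySem.Chars.slice (PySem.Chars.lstrip opener) none (some 3)) x) + 1)).length ≤ n) := by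
          simp only [List.length_drop]; omega
        rw [ih _ hd]
        simp only [hc', Bool.false_eq_true, if_false]
        rw [pvSkipA_eq_drop]

-- ===== VERDICT (by name: the statement is the Claim_ definition above) =====
theorem remove_standalone_docstrings_spec : Claim_equal_remove_standalone_docstrings := by
  intro source _
  unfold Spec_remove_standalone_docstrings remove_standalone_docstrings remove_standalone_docstrings_alt
  rw [pvGoB_eq_pvGoA (pvSplitKeep source.toList []).length _ le_rfl]
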